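-- pv_equiv track=rewrite | github.com/larahoffman/algo1 | Python/parcial2023.py | acomodar2
-- ===== SOURCE A (Python) =====
-- def acomodar2(s1: list) -> list: #esta parece mejor
--     res: list = []
--     for boleta_up in s1:
--         if boleta_up == "UP":
--             res.append(boleta_up)
--     for boleta_lla in s1:
--         if boleta_lla == "LLA":
--             res.append(boleta_lla)
--     return res
-- ===== SOURCE B (Python) =====
-- def acomodar2(s1: list) -> list:
--     # One pass keeps every ballot that is "UP" or "LLA"; a stable sort on the
--     # boolean key (x != "UP") then puts the UP block before the LLA block.
--     return sorted((x for x in s1 if x in ("UP", "LLA")), key=lambda x: x != "UP")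
-- ===== Notes on version B (the rewrite author's own statement) =====
-- stated objective: alternative
-- what changed: Replaces A's two staged filter-and-append loops with a single filtering pass keeping both literals followed by a stable sort on the boolean key (x != 'UP'), which groups the UP block before the LLA block.
import Mathlib
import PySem

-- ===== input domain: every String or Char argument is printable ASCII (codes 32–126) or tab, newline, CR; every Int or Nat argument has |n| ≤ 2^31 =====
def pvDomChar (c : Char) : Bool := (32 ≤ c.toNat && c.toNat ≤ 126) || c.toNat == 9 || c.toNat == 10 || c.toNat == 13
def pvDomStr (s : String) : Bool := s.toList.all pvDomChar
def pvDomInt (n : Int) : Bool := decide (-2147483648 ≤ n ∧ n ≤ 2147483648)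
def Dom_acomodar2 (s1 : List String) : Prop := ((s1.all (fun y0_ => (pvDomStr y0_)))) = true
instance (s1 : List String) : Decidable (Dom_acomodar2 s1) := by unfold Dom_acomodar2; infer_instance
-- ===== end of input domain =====

-- B replaces A's two staged filter-and-append loops with one filtering pass plus a
-- stable sort on the boolean key (x != "UP") that puts the UP block first; objective: alternative.

-- ===== PORT A =====
-- two loops over s1, each appending the matching literal to res
def acomodar2 (s1 : List String) : List String :=
  let res : List String := []
  let res := s1.foldl (fun r boleta_up => if boleta_up = "UP" then r ++ [boleta_up] else r) res
  let res := s1.foldl (fun r boleta_lla => if boleta_lla = "LLA" then r ++ [boleta_lla] else r) res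
  res

-- ===== PORT B =====
-- the generator 'x for x in s1 if x in ("UP","LLA")' is List.filter; sorted with the
-- boolean key (x != "UP") is PySem.List.sorted with the key ported as the int 0/1
-- (Python compares bools as the ints 0/1, so this is exact)
def acomodar2_alt (s1 : List String) : List String :=
  PySem.List.sorted (s1.filter (fun x => x = "UP" || x = "LLA"))
    (fun x => if x = "UP" then (0 : Int) else 1) false

-- ===== PRECONDITION & SPEC =====
def Spec_acomodar2 (s1 : List String) (out : List String) : Prop := out = acomodar2_alt s1
instance (s1 : List String) (out : List String) : Decidable (Spec_acomodar2 s1 out) := by unfold Spec_acomodar2; infer_instance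

-- ===== CLAIM (what is proved, stated in full; the proofs are below) =====
def Claim_equal_acomodar2 : Prop := ∀ (s1 : List String), Dom_acomodar2 s1 → Spec_acomodar2 s1 (acomodar2 s1)

-- ===== LEMMAS AND PROOFS =====

-- the comparison used by B's stable insertion sort
def pvBef : String → String → Bool :=
  fun a b => decide ((if a = "UP" then (0 : Int) else 1) < (if b = "UP" then (0 : Int) else 1))

-- A's loops produce the two replicate blocks
theorem foldl_filter_eq_replicate (v : String) (l : List String) (acc : List String) :
    l.foldl (fun r x => if x = v then r ++ [x] else r) acc
      = acc ++ List.replicate (List.count v l) v := by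
  induction l generalizing acc with
  | nil => simp
  | cons h t ih =>
      by_cases hv : h = v
      · subst hv
        simp [List.foldl, ih, List.replicate, List.append_assoc]
      · simp [List.foldl, hv, ih]

-- inserting "UP" into a ⟨UP-block ++ LLA-block⟩ list extends the UP block
theorem insertBy_up (a b : Nat) :
    PySem.List.insertBy pvBef "UP" (List.replicate a "UP" ++ List.replicate b "LLA")
      = List.replicate (a + 1) "UP" ++ List.replicate b "LLA" := by
  induction a with
  | zero =>
      cases b with
      | zero => simp [PySem.List.insertBy]
      | succ b' => simp [PySem.List.insertBy, pvBef, List.replicate]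
  | succ a' ih =>
      simp only [List.replicate, List.cons_append, PySem.List.insertBy, pvBef]
      simp [ih, List.replicate]

-- inserting "LLA" appends at the very end
theorem insertBy_lla (a b : Nat) :
    PySem.List.insertBy pvBef "LLA" (List.replicate a "UP" ++ List.replicate b "LLA")
      = List.replicate a "UP" ++ List.replicate (b + 1) "LLA" := by
  induction a with
  | zero =>
      simp only [List.replicate, List.nil_append]
      induction b with
      | zero => simp [PySem.List.insertBy]
      | succ b' ihb =>
          simp only [List.replicate, PySem.List.insertBy, pvBef]
          simpa [pvBef] using ihb
  | succ a' ih =>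
      simp only [List.replicate, List.cons_append, PySem.List.insertBy, pvBef]
      simpa [pvBef] using ih

-- the insertion-sort fold over a list of "UP"/"LLA" ballots builds the two blocks
theorem foldl_insertBy_blocks (l : List String)
    (hl : ∀ x ∈ l, x = "UP" ∨ x = "LLA") (a b : Nat) :
    l.foldl (fun acc x => PySem.List.insertBy pvBef x acc)
        (List.replicate a "UP" ++ List.replicate b "LLA")
      = List.replicate (a + List.count "UP" l) "UP"
        ++ List.replicate (b + List.count "LLA" l) "LLA" := by
  induction l generalizing a b with
  | nil => simp
  | cons h t ih =>
      have hmem : ∀ x ∈ t, x = "UP" ∨ x = "LLA" := fun x hx => hl x (by simp [hx])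
      rcases hl h (by simp) with hh | hh <;> subst hh
      · rw [List.foldl_cons, insertBy_up, ih hmem]
        simp
        omega
      · rw [List.foldl_cons, insertBy_lla, ih hmem]
        simp
        omega

-- counting a kept literal through the disjunctive filter
theorem count_filter_both (s1 : List String) (v : String) (hv : (v = "UP" || v = "LLA") = true) :
    List.count v (s1.filter (fun x => x = "UP" || x = "LLA")) = List.count v s1 := by
  induction s1 with
  | nil => rfl
  | cons h t ih =>
      by_cases hk : (h = "UP" || h = "LLA") = true
      · simp [hk, List.count_cons, ih]
      · have hne : ¬ (v = h) := by
          intro he; subst he; exact hk hv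
        simp [hk, ih, Ne.symm hne]

-- ===== VERDICT (by name: the statement is the Claim_ definition above) =====
theorem acomodar2_spec : Claim_equal_acomodar2 := by
  intro s1 _
  unfold Spec_acomodar2 acomodar2 acomodar2_alt
  simp only [foldl_filter_eq_replicate, List.nil_append]
  rw [PySem.List.sorted]
  have hbef : (fun a b : String =>
        decide ((if a = "UP" then (0:Int) else 1) < (if b = "UP" then (0:Int) else 1))) = pvBef := rfl
  have h := foldl_insertBy_blocks (s1.filter (fun x => x = "UP" || x = "LLA"))
      (by intro x hx; have := List.of_mem_filter hx; simpa using this) 0 0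
  simp only [List.replicate, List.append_nil] at h
  simp only [Bool.false_eq_true, if_false, hbef]
  rw [h, count_filter_both s1 "UP" (by decide), count_filter_both s1 "LLA" (by decide)]
  simp
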